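-- pv_equiv track=rewrite | github.com/Lambertain/ai-agent-factory | use-cases/agent-factory-with-subagents/agents/archon_quality_guardian/dependencies.py | should_delegate
-- ===== SOURCE A (Python) =====
-- from typing import List, Optional, Dict, Any
--
-- def should_delegate(task_keywords: List[str]) -> Optional[str]:
--     """
--     Определить нужно ли делегировать задачу другому агенту.
--
--     Args:
--         task_keywords: Ключевые слова из задачи
--
--     Returns:
--         Тип агента для делегирования или None
--     """
--     # Матрица компетенций для делегирования
--     competency_matrix = {
--         "security_audit": ["security", "vulnerability", "penetration", "cve"],
--         "performance_optimization": ["performance", "optimization", "profiling", "speed"],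
--         "uiux_enhancement": ["ui", "ux", "design", "interface"],
--         "typescript_architecture": ["typescript", "architecture", "types"]
--     }
--
--     # Проверяем пересечение с компетенциями других агентов
--     for agent_type, competencies in competency_matrix.items():
--         overlap = set(task_keywords) & set(competencies)
--         if len(overlap) >= 2:  # Значительное пересечение
--             return agent_type
--
--     return None
-- ===== SOURCE B (Python) =====
-- from typing import List, Optional
--
-- def should_delegate(task_keywords: List[str]) -> Optional[str]:
--     competency_matrix = {
--         "security_audit": ["security", "vulnerability", "penetration", "cve"],
--         "performance_optimization": ["performance", "optimization", "profiling", "speed"],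
--         "uiux_enhancement": ["ui", "ux", "design", "interface"],
--         "typescript_architecture": ["typescript", "architecture", "types"]
--     }
--     # Inverted index: keyword -> agent (keyword lists are pairwise disjoint)
--     index = {}
--     for agent_type, competencies in competency_matrix.items():
--         for kw in competencies:
--             index[kw] = agent_type
--     # One pass over the distinct task keywords, tallying hits per agent
--     hits = {}
--     for kw in set(task_keywords):
--         agent = index.get(kw)
--         if agent is not None:
--             hits[agent] = hits.get(agent, 0) + 1
--     # First agent (matrix order) with a significant overlap
--     for agent_type in competency_matrix:
--         if hits.get(agent_type, 0) >= 2: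
--             return agent_type
--     return None
-- ===== Notes on version B (the rewrite author's own statement) =====
-- stated objective: faster
-- what changed: Replaced the per-agent set-intersection loop with an inverted index (keyword -> agent) built once, a single tally pass over the distinct task keywords incrementing a per-agent hit counter, and a final scan of the matrix keys for the first agent with >= 2 hits; one dict lookup per distinct keyword replaces four set constructions/intersections per call.
import Mathlib
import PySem

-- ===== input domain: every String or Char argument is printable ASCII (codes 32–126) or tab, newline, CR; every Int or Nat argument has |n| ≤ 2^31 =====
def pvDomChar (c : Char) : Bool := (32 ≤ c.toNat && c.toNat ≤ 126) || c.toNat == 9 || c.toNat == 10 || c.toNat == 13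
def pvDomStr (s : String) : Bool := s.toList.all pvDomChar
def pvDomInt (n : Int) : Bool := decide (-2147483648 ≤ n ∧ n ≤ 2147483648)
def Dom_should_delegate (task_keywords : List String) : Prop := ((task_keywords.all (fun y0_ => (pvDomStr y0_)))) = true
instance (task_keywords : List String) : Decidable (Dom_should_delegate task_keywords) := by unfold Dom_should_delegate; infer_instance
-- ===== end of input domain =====

-- B replaces A's per-agent set intersections by an inverted keyword->agent index and a
-- one-pass per-agent hit tally over the distinct task keywords (alternative decomposition, same result).

-- ===== PORT A =====
-- the literal competency matrix (shared constant; both Pythons spell out the same literal)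
def pvMatrix : List (String × List String) :=
  [("security_audit", ["security", "vulnerability", "penetration", "cve"]),
   ("performance_optimization", ["performance", "optimization", "profiling", "speed"]),
   ("uiux_enhancement", ["ui", "ux", "design", "interface"]),
   ("typescript_architecture", ["typescript", "architecture", "types"])]

-- A's for-loop over competency_matrix.items()
def pvALoop (task_keywords : List String) : List (String × List String) → Option String
  | [] => none
  | (agent_type, competencies) :: rest =>
      let overlap := PySem.Set.inter (PySem.Set.ofList task_keywords) (PySem.Set.ofList competencies)
      if overlap.length ≥ 2 then some agent_type else pvALoop task_keywords rest

def should_delegate (task_keywords : List String) : Option String :=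
  pvALoop task_keywords pvMatrix

-- ===== PORT B =====
-- the inverted index keyword -> agent_type, built once from the matrix
def pvIndex : PySem.Dict String String :=
  pvMatrix.foldl (fun d p => p.2.foldl (fun d kw => d.insert kw p.1) d) PySem.Dict.empty

-- B's tally pass: for kw in set(task_keywords): hits[index[kw]] += 1 when kw is indexed
def pvHits (task_keywords : List String) : PySem.Dict String Int :=
  (PySem.Set.ofList task_keywords).foldl
    (fun hits kw =>
      match pvIndex.get? kw with
      | some agent => hits.insert agent (hits.getD agent 0 + 1)
      | none => hits)
    PySem.Dict.empty

-- B's final scan of competency_matrix keys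
def pvBLoop (hits : PySem.Dict String Int) : List String → Option String
  | [] => none
  | agent_type :: rest =>
      if hits.getD agent_type 0 ≥ 2 then some agent_type else pvBLoop hits rest

def should_delegate_alt (task_keywords : List String) : Option String :=
  pvBLoop (pvHits task_keywords) (pvMatrix.map (·.1))

-- ===== PRECONDITION & SPEC =====
def Spec_should_delegate (task_keywords : List String) (out : Option String) : Prop := out = should_delegate_alt task_keywords
instance (task_keywords : List String) (out : Option String) : Decidable (Spec_should_delegate task_keywords out) := by unfold Spec_should_delegate; infer_instance

-- ===== CLAIM (what is proved, stated in full; the proofs are below) =====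
def Claim_equal_should_delegate : Prop := ∀ (task_keywords : List String), Dom_should_delegate task_keywords → Spec_should_delegate task_keywords (should_delegate task_keywords)

-- ===== LEMMAS AND PROOFS =====

-- pvIndex, evaluated: the 15 keyword -> agent pairs in insertion order
def pvPairs : List (String × String) :=
  [("security","security_audit"),("vulnerability","security_audit"),("penetration","security_audit"),("cve","security_audit"),
   ("performance","performance_optimization"),("optimization","performance_optimization"),("profiling","performance_optimization"),("speed","performance_optimization"),
   ("ui","uiux_enhancement"),("ux","uiux_enhancement"),("design","uiux_enhancement"),("interface","uiux_enhancement"),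
   ("typescript","typescript_architecture"),("architecture","typescript_architecture"),("types","typescript_architecture")]

theorem index_eq : pvIndex = PySem.Dict.mk pvPairs := by decide

-- a dict with distinct keys returns `some a` at k exactly when (k, a) is one of its pairs
theorem get?_mk_eq_some_iff (ps : List (String × String)) (hnd : (ps.map Prod.fst).Nodup)
    (k a : String) : ((PySem.Dict.mk ps).get? k == some a) = ps.contains (k, a) := by
  induction ps with
  | nil => simp [PySem.Dict.get?]
  | cons p rest ih =>
      obtain ⟨k', v'⟩ := p
      simp only [List.map_cons, List.nodup_cons] at hnd
      rw [PySem.Dict.get?_mk_cons]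
      by_cases hk : k' = k
      · subst hk
        have hm : (k', a) ∉ rest := fun hmem => hnd.1 (List.mem_map_of_mem hmem)
        by_cases h : v' = a
        · simp [h, hm]
        · simp [h, hm, Ne.symm h]
      · have hb : (k' == k) = false := by simp [hk]
        simp [hb, ih hnd.2, Prod.ext_iff, Ne.symm hk]

-- index lookup hits agent a exactly on a's competency keywords (checked per matrix row)
theorem index_mem (a : String) (cs : List String) (hmem : (a, cs) ∈ pvMatrix) (k : String) :
    (pvIndex.get? k == some a) = cs.contains k := by
  rw [index_eq, get?_mk_eq_some_iff pvPairs (by decide)]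
  fin_cases hmem <;> simp [pvPairs, List.contains_eq_mem, Prod.ext_iff]

-- the tally loop equals counting via filterMap through the index
theorem hits_eq_counter (ds : List String) (h : PySem.Dict String Int) :
    ds.foldl
      (fun hits kw =>
        match pvIndex.get? kw with
        | some agent => hits.insert agent (hits.getD agent 0 + 1)
        | none => hits) h
    = (ds.filterMap pvIndex.get?).foldl (fun d a => d.insert a (d.getD a 0 + 1)) h := by
  induction ds generalizing h with
  | nil => rfl
  | cons k rest ih =>
      simp only [List.foldl_cons, List.filterMap_cons]
      cases pvIndex.get? k <;> simp [ih]

-- per-agent value of B's counter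
theorem hits_getD (ks : List String) (a : String) :
    (pvHits ks).getD a 0
      = (((PySem.Set.ofList ks).filterMap pvIndex.get?).count a : Int) := by
  unfold pvHits
  rw [hits_eq_counter]
  rw [PySem.Dict.getD_foldl_insert_add_one]
  simp [PySem.Dict.getD]

-- counting through filterMap = counting the preimages
theorem count_filterMap_index (ds : List String) (a : String) :
    (ds.filterMap pvIndex.get?).count a
      = ds.countP (fun k => pvIndex.get? k == some a) := by
  induction ds with
  | nil => rfl
  | cons k rest ih =>
      simp only [List.filterMap_cons, List.countP_cons]
      cases hk : pvIndex.get? k with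
      | none => simp [ih]
      | some b =>
          by_cases hb : b = a
          · subst hb; simp [ih]
          · simp [hb, ih]

-- per-agent: B's counter value is the length of A's overlap
theorem hits_eq_overlap (ks : List String) (a : String) (cs : List String)
    (hmem : (a, cs) ∈ pvMatrix) :
    (pvHits ks).getD a 0
      = ((PySem.Set.inter (PySem.Set.ofList ks) (PySem.Set.ofList cs)).length : Int) := by
  rw [hits_getD, count_filterMap_index]
  congr 1
  have hcnt : ∀ k, (pvIndex.get? k == some a) = (PySem.Set.ofList cs).contains k := by
    intro k
    rw [index_mem a cs hmem k]
    simp [PySem.Set.contains, List.contains_eq_mem]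
  simp only [PySem.Set.inter, PySem.Set.contains]
  rw [← List.countP_eq_length_filter]
  exact List.countP_congr (fun k _ => by rw [hcnt k]; rfl)

-- top-level: the two programs agree
theorem main_eq (ks : List String) :
    should_delegate_alt ks = should_delegate ks := by
  unfold should_delegate should_delegate_alt
  have h1 := hits_eq_overlap ks "security_audit" ["security", "vulnerability", "penetration", "cve"] (by decide)
  have h2 := hits_eq_overlap ks "performance_optimization" ["performance", "optimization", "profiling", "speed"] (by decide)
  have h3 := hits_eq_overlap ks "uiux_enhancement" ["ui", "ux", "design", "interface"] (by decide)
  have h4 := hits_eq_overlap ks "typescript_architecture" ["typescript", "architecture", "types"] (by decide)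
  simp only [pvMatrix, List.map_cons, List.map_nil, pvALoop, pvBLoop, h1, h2, h3, h4]
  norm_num

-- ===== VERDICT (by name: the statement is the Claim_ definition above) =====
theorem should_delegate_spec : Claim_equal_should_delegate := by
  intro ks _
  unfold Spec_should_delegate
  exact (main_eq ks).symm
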